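-- pv_equiv track=rewrite | github.com/wdconinc/bubble-sheet-auto-mark | src/bubble_mark/models/answer_key.py | _unshuffle_answers
-- ===== SOURCE A (Python) =====
-- _LCG_A: int = 1664525
--
-- _LCG_C: int = 1013904223
--
-- _LCG_M: int = 2**32
--
-- def _lcg_sequence(seed: int, length: int) -> list[int]:
--     """Return *length* consecutive LCG values starting from *seed*."""
--     state = int(seed) & 0xFFFFFFFF
--     out = []
--     for _ in range(length):
--         state = (_LCG_A * state + _LCG_C) % _LCG_M
--         out.append(state)
--     return out
--
-- def _unshuffle_answers(answers: str, seed: int) -> str: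
--     """Reverse a :func:`_shuffle_answers` permutation.
--
--     When *seed* is 0 the original string is returned unchanged.
--
--     See https://en.wikipedia.org/wiki/Fisher%E2%80%93Yates_shuffle for a
--     description of the shuffle algorithm used here.
--     """
--     if seed == 0:
--         return answers
--     n = len(answers)
--     if n <= 1:
--         return answers
--     # Recompute the same swap sequence used during shuffling.
--     lcg_vals = _lcg_sequence(seed, n - 1)
--     result = list(answers)
--     # Replay swaps in reverse order to invert the permutation.
--     for i in range(1, n):
--         j = lcg_vals[n - 1 - i] % (i + 1)
--         result[i], result[j] = result[j], result[i]
--     return "".join(result)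
-- ===== SOURCE B (Python) =====
-- def _unshuffle_answers(answers, seed):
--     if seed == 0:
--         return answers
--     n = len(answers)
--     if n <= 1:
--         return answers
--     # Replay the forward Fisher-Yates shuffle on an index permutation table,
--     # streaming the LCG state directly (no precomputed value list), then
--     # scatter each character to its shuffled position in one pass.
--     perm = list(range(n))
--     state = seed & 0xFFFFFFFF
--     for i in range(n - 1, 0, -1):
--         state = (1664525 * state + 1013904223) % 2**32
--         j = state % (i + 1)
--         perm[i], perm[j] = perm[j], perm[i]
--     out = [''] * n
--     for k, ch in enumerate(answers):
--         out[perm[k]] = ch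
--     return ''.join(out)
-- ===== Notes on version B (the rewrite author's own statement) =====
-- stated objective: alternative
-- what changed: A precomputes the whole LCG value list and inverts the shuffle by replaying the swap sequence in reverse directly on the character list; B drops the value list entirely, streams the LCG state inline while replaying the forward Fisher-Yates swaps on an index permutation table, and then scatters each character to its permuted position in a separate pass.
import Mathlib
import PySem

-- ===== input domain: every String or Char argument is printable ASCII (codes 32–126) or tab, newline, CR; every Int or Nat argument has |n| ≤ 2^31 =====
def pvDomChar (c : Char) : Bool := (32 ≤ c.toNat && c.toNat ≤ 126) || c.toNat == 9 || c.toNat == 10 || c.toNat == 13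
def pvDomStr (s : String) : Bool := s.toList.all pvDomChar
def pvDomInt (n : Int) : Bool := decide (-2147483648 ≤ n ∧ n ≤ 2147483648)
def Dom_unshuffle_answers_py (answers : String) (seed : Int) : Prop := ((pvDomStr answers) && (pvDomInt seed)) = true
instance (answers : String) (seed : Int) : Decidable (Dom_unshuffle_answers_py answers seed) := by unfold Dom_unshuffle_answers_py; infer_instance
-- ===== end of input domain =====

-- B replaces A's reverse replay of the swap list on the characters by a forward
-- Fisher-Yates replay on an index table with the LCG state streamed inline (no
-- precomputed value list), followed by a one-pass scatter (objective: alternative).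

-- ===== PORT A =====

-- Python helper _lcg_sequence (used by A only)
def lcg_sequence_py (seed : Int) (length : Int) : List Int :=
  ((PySem.List.pyRange 0 length 1).foldl
    (fun (p : Int × List Int) _ =>
      let st := PySem.Int.mod (1664525 * p.1 + 1013904223) 4294967296
      (st, p.2 ++ [st]))
    (PySem.Int.band seed 4294967295, [])).2

def unshuffle_answers_py (answers : String) (seed : Int) : String :=
  if seed = 0 then answers
  else
    let n : Int := PySem.Str.len answers
    if n ≤ 1 then answers
    else
      let lcg_vals := lcg_sequence_py seed (n - 1)
      let result := answers.toList
      let result := (PySem.List.pyRange 1 n 1).foldl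
        (fun r i =>
          let j := PySem.Int.mod (PySem.List.pyGetD lcg_vals (n - 1 - i) 0) (i + 1)
          let vj := PySem.List.pyGetD r j ' '
          let vi := PySem.List.pyGetD r i ' '
          PySem.List.pySetD (PySem.List.pySetD r i vj) j vi)
        result
      String.ofList result

-- ===== PORT B =====

def unshuffle_answers_py_alt (answers : String) (seed : Int) : String :=
  if seed = 0 then answers
  else
    let n : Int := PySem.Str.len answers
    if n ≤ 1 then answers
    else
      -- perm = list(range(n)); state = seed & 0xFFFFFFFF; forward shuffle replay
      let sp := (PySem.List.pyRange (n - 1) 0 (-1)).foldl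
        (fun (p : Int × List Int) i =>
          let state := PySem.Int.mod (1664525 * p.1 + 1013904223) 4294967296
          let j := PySem.Int.mod state (i + 1)
          (state,
            PySem.List.pySetD
              (PySem.List.pySetD p.2 i (PySem.List.pyGetD p.2 j 0)) j
              (PySem.List.pyGetD p.2 i 0)))
        (PySem.Int.band seed 4294967295, PySem.List.pyRange 0 n 1)
      -- out = [''] * n; out[perm[k]] = ch; ''.join(out)
      let out := (PySem.List.enumerate answers.toList).foldl
        (fun o kc => PySem.List.pySetD o (PySem.List.pyGetD sp.2 kc.1 0) (String.ofList [kc.2]))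
        (PySem.List.pyRepeat [""] n)
      PySem.Str.join "" out

-- ===== PRECONDITION & SPEC =====
def Spec_unshuffle_answers_py (answers : String) (seed : Int) (out : String) : Prop := out = unshuffle_answers_py_alt answers seed
instance (answers : String) (seed : Int) (out : String) : Decidable (Spec_unshuffle_answers_py answers seed out) := by unfold Spec_unshuffle_answers_py; infer_instance

-- ===== CLAIM (what is proved, stated in full; the proofs are below) =====
def Claim_equal_unshuffle_answers_py : Prop := ∀ (answers : String) (seed : Int), Dom_unshuffle_answers_py answers seed → Spec_unshuffle_answers_py answers seed (unshuffle_answers_py answers seed)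

-- ===== LEMMAS AND PROOFS =====

-- swap of the entries at Nat positions i and j (what both loop bodies do)
def swapD {α : Type} (d : α) (l : List α) (i j : Nat) : List α :=
  (l.set i (l.getD j d)).set j (l.getD i d)

-- the transposition (i j) as a function on indices
def trN (i j p : Nat) : Nat := if p = i then j else if p = j then i else p

-- composite permutation of a list of transpositions, first pair outermost
def sigmaN : List (Nat × Nat) → Nat → Nat
  | [], p => p
  | q :: L, p => trN q.1 q.2 (sigmaN L p)

theorem length_swapD {α : Type} (d : α) (l : List α) (i j : Nat) :
    (swapD d l i j).length = l.length := by
  simp [swapD]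

theorem getD_set_self' {α : Type} (l : List α) (i : Nat) (v d : α) (h : i < l.length) :
    (l.set i v).getD i d = v := by
  simp [List.getD_eq_getElem?_getD, h]

theorem getD_set_ne' {α : Type} (l : List α) {i p : Nat} (v d : α) (h : p ≠ i) :
    (l.set i v).getD p d = l.getD p d := by
  simp [List.getD_eq_getElem?_getD, Ne.symm h]

theorem getD_swapD {α : Type} (d : α) (l : List α) {i j : Nat}
    (hi : i < l.length) (hj : j < l.length) (p : Nat) :
    (swapD d l i j).getD p d = l.getD (trN i j p) d := by
  unfold swapD trN
  by_cases hpj : p = j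
  · subst hpj
    rw [getD_set_self' _ _ _ _ (by simpa using hj)]
    by_cases hpi : p = i
    · subst hpi; simp
    · simp [hpi]
  · by_cases hpi : p = i
    · subst hpi
      rw [getD_set_ne' _ _ _ hpj, getD_set_self' _ _ _ _ hi]
      simp
    · rw [getD_set_ne' _ _ _ hpj, getD_set_ne' _ _ _ hpi]
      simp [hpi, hpj]

theorem length_foldl_swapD {α : Type} (d : α) (ps : List (Nat × Nat)) (a : List α) :
    (ps.foldl (fun r q => swapD d r q.1 q.2) a).length = a.length := by
  induction ps generalizing a with
  | nil => rfl
  | cons q L ih => simp [List.foldl_cons, ih, length_swapD]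

theorem getD_foldl_swapD {α : Type} (d : α) (ps : List (Nat × Nat)) (a : List α)
    (hb : ∀ q ∈ ps, q.1 < a.length ∧ q.2 < a.length) (p : Nat) :
    (ps.foldl (fun r q => swapD d r q.1 q.2) a).getD p d = a.getD (sigmaN ps p) d := by
  induction ps generalizing a with
  | nil => rfl
  | cons q L ih =>
    have hq := hb q (List.mem_cons_self ..)
    simp only [List.foldl_cons, sigmaN]
    rw [ih (swapD d a q.1 q.2)
          (by intro r hr; simpa [length_swapD] using hb r (List.mem_cons_of_mem _ hr)),
        getD_swapD d a hq.1 hq.2]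

theorem sigmaN_lt {n : Nat} (ps : List (Nat × Nat))
    (hb : ∀ q ∈ ps, q.1 < n ∧ q.2 < n) {p : Nat} (hp : p < n) : sigmaN ps p < n := by
  induction ps with
  | nil => exact hp
  | cons q L ih =>
    have hq := hb q (List.mem_cons_self ..)
    have hL := ih (fun r hr => hb r (List.mem_cons_of_mem _ hr))
    simp only [sigmaN, trN]
    split_ifs <;> omega

theorem trN_trN (i j p : Nat) : trN i j (trN i j p) = p := by
  unfold trN; split_ifs <;> omega

theorem sigmaN_append (L1 L2 : List (Nat × Nat)) (p : Nat) :
    sigmaN (L1 ++ L2) p = sigmaN L1 (sigmaN L2 p) := by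
  induction L1 with
  | nil => rfl
  | cons q L ih => simp [sigmaN, ih]

theorem sigmaN_reverse_sigmaN (ps : List (Nat × Nat)) (p : Nat) :
    sigmaN ps.reverse (sigmaN ps p) = p := by
  induction ps generalizing p with
  | nil => rfl
  | cons q L ih =>
    simp only [List.reverse_cons, sigmaN, sigmaN_append, trN_trN]
    exact ih p

theorem sigmaN_sigmaN_reverse (ps : List (Nat × Nat)) (p : Nat) :
    sigmaN ps (sigmaN ps.reverse p) = p := by
  have h := sigmaN_reverse_sigmaN ps.reverse p
  simpa using h

theorem scatter_length {β : Type} (g : Nat → Nat) (v : Nat → β) (ks : List Nat) (o : List β) :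
    (ks.foldl (fun o k => o.set (g k) (v k)) o).length = o.length := by
  induction ks generalizing o with
  | nil => rfl
  | cons k ks ih => simp [List.foldl_cons, ih]

theorem scatter_untouched {β : Type} (d : β) (g : Nat → Nat) (v : Nat → β)
    (ks : List Nat) (o : List β) {p : Nat} (hp : ∀ k ∈ ks, g k ≠ p) :
    (ks.foldl (fun o k => o.set (g k) (v k)) o).getD p d = o.getD p d := by
  induction ks generalizing o with
  | nil => rfl
  | cons k ks ih =>
    simp only [List.foldl_cons]
    rw [ih _ (fun k' hk' => hp k' (List.mem_cons_of_mem _ hk')),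
        getD_set_ne' _ _ _ (Ne.symm (hp k (List.mem_cons_self ..)))]

theorem scatter_hit {β : Type} (d : β) (g : Nat → Nat) (v : Nat → β)
    (ks : List Nat) (o : List β) (hnd : ks.Nodup)
    (hg : ∀ k ∈ ks, g k < o.length)
    (hinj : ∀ k ∈ ks, ∀ k' ∈ ks, g k = g k' → k = k')
    {k0 : Nat} (hk0 : k0 ∈ ks) :
    (ks.foldl (fun o k => o.set (g k) (v k)) o).getD (g k0) d = v k0 := by
  induction ks generalizing o with
  | nil => exact absurd hk0 (List.not_mem_nil)
  | cons k ks ih =>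
    simp only [List.foldl_cons]
    rcases List.mem_cons.1 hk0 with hk | hk
    · subst hk
      have hnot : k0 ∉ ks := (List.nodup_cons.1 hnd).1
      rw [scatter_untouched d g v ks _ (fun k' hk' heq => hnot (by
            rwa [hinj k' (List.mem_cons_of_mem _ hk') k0 (List.mem_cons_self ..) heq] at hk')),
          getD_set_self' _ _ _ _ (hg k0 (List.mem_cons_self ..))]
    · exact ih _ (List.nodup_cons.1 hnd).2
        (fun k' hk' => by simpa using hg k' (List.mem_cons_of_mem _ hk'))
        (fun a ha b hb => hinj a (List.mem_cons_of_mem _ ha) b (List.mem_cons_of_mem _ hb)) hk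

-- the (i, j) pair sequence of A's LCG swap schedule, as Nat indices
def pfDef (L : List Int) (nn : Int) (k : Nat) : Nat × Nat :=
  (k + 1, (PySem.Int.mod (PySem.List.pyGetD L (nn - 1 - (1 + (k:Int))) 0) ((1 + (k:Int)) + 1)).toNat)

-- A's loop body is swapD at the pfDef indices
theorem foldBody_eq (L : List Int) (nn : Int) (a : List Char) (ks : List Nat) :
    List.foldl (fun r i =>
        PySem.List.pySetD
          (PySem.List.pySetD r i
            (PySem.List.pyGetD r
              (PySem.Int.mod (PySem.List.pyGetD L (nn - 1 - i) 0) (i + 1)) ' '))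
          (PySem.Int.mod (PySem.List.pyGetD L (nn - 1 - i) 0) (i + 1))
          (PySem.List.pyGetD r i ' '))
        a (ks.map (fun (k : Nat) => (1 + (k:Int) : Int)))
    = List.foldl (fun r q => swapD ' ' r q.1 q.2) a (ks.map (pfDef L nn)) := by
  induction ks generalizing a with
  | nil => rfl
  | cons k ks ih =>
    simp only [List.map_cons, List.foldl_cons]
    rw [← ih]
    congr 1
    unfold pfDef
    generalize hj : PySem.Int.mod (PySem.List.pyGetD L (nn - 1 - (1 + (k:Int))) 0) ((1 + (k:Int)) + 1) = j
    have hj0 : 0 ≤ j := by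
      rw [← hj]
      exact PySem.Int.mod_nonneg _ (by positivity)
    rw [show (1 + (k:Int)) = ((k+1 : Nat) : Int) by push_cast; ring,
        show j = ((j.toNat : Nat) : Int) from (Int.toNat_of_nonneg hj0).symm]
    simp only [swapD, PySem.List.pySetD_natCast, PySem.List.pyGetD_natCast, Int.toNat_natCast]

theorem pfDef_bounds (L : List Int) (nn : Int) (m : Nat) :
    ∀ q ∈ (List.range (m-1)).map (pfDef L nn), q.1 < m ∧ q.2 < m := by
  intro q hq
  rcases List.mem_map.1 hq with ⟨k, hk, rfl⟩
  rw [List.mem_range] at hk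
  unfold pfDef
  generalize hj : PySem.Int.mod (PySem.List.pyGetD L (nn - 1 - (1 + (k:Int))) 0) ((1 + (k:Int)) + 1) = j
  have hj0 : 0 ≤ j := by rw [← hj]; exact PySem.Int.mod_nonneg _ (by positivity)
  have hjlt : j < (1 + (k:Int)) + 1 := by rw [← hj]; exact PySem.Int.mod_lt _ (by positivity)
  constructor
  · simp; omega
  · simp; omega

-- ===== B-side bridging: the streamed LCG state vs A's precomputed value list =====

def lcgNext (st : Int) : Int := PySem.Int.mod (1664525 * st + 1013904223) 4294967296

def lcgList (st : Int) : Nat → List Int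
  | 0 => []
  | k+1 => lcgNext st :: lcgList (lcgNext st) k

theorem lcgList_length (st : Int) (c : Nat) : (lcgList st c).length = c := by
  induction c generalizing st with
  | zero => rfl
  | succ k ih => simp [lcgList, ih]

theorem lcg_fold (l : List Int) (st : Int) (acc : List Int) :
    ((l.foldl (fun (p : Int × List Int) _ =>
        let s := PySem.Int.mod (1664525 * p.1 + 1013904223) 4294967296
        (s, p.2 ++ [s])) (st, acc)).2) = acc ++ lcgList st l.length := by
  induction l generalizing st acc with
  | nil => simp [lcgList]
  | cons x xs ih =>
    simp only [List.foldl_cons, List.length_cons]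
    rw [ih]
    simp [lcgList, lcgNext]

theorem lcg_seq_eq (seed len : Int) :
    lcg_sequence_py seed len = lcgList (PySem.Int.band seed 4294967295) len.toNat := by
  unfold lcg_sequence_py
  rw [lcg_fold]
  rw [PySem.List.length_pyRange_one]
  simp

-- B's fused loop: the (i, j) pairs it swaps at, as Nat indices
def mkPairs (st : Int) : List Int → List (Nat × Nat)
  | [] => []
  | i :: rest => (i.toNat, (PySem.Int.mod (lcgNext st) (i + 1)).toNat) :: mkPairs (lcgNext st) rest

theorem streamFold_eq (is : List Int) (st : Int) (p0 : List Int) (h : ∀ i ∈ is, 0 ≤ i) :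
    ((is.foldl (fun (p : Int × List Int) i =>
        let state := PySem.Int.mod (1664525 * p.1 + 1013904223) 4294967296
        let j := PySem.Int.mod state (i + 1)
        (state,
          PySem.List.pySetD
            (PySem.List.pySetD p.2 i (PySem.List.pyGetD p.2 j 0)) j
            (PySem.List.pyGetD p.2 i 0)))
      (st, p0)).2)
    = (mkPairs st is).foldl (fun r q => swapD (0:Int) r q.1 q.2) p0 := by
  induction is generalizing st p0 with
  | nil => rfl
  | cons i rest ih =>
    have hi : 0 ≤ i := h i (List.mem_cons_self ..)
    simp only [List.foldl_cons, mkPairs]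
    rw [← ih _ _ (fun x hx => h x (List.mem_cons_of_mem _ hx))]
    congr 2
    generalize hj : PySem.Int.mod (lcgNext st) (i + 1) = j
    have hj0 : 0 ≤ j := by rw [← hj]; exact PySem.Int.mod_nonneg _ (by omega)
    rw [show i = ((i.toNat : Nat) : Int) from (Int.toNat_of_nonneg hi).symm,
        show (PySem.Int.mod (PySem.Int.mod (1664525 * st + 1013904223) 4294967296) (((i.toNat : Nat) : Int) + 1)) = j by
          rw [← hj]; rw [Int.toNat_of_nonneg hi]; rfl,
        show j = ((j.toNat : Nat) : Int) from (Int.toNat_of_nonneg hj0).symm]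
    simp only [swapD, PySem.List.pySetD_natCast, PySem.List.pyGetD_natCast, Int.toNat_natCast,
      lcgNext]

theorem mkPairs_zip (st : Int) (is : List Int) :
    mkPairs st is
    = ((is.zip (lcgList st is.length)).map
        (fun q => (q.1.toNat, (PySem.Int.mod q.2 (q.1 + 1)).toNat))) := by
  induction is generalizing st with
  | nil => rfl
  | cons i rest ih => simp [mkPairs, lcgList, ih]

-- B's pair sequence is A's pair sequence reversed
theorem mkPairs_eq (st : Int) (m : Nat) (hm : 2 ≤ m) :
    mkPairs st ((List.range (m-1)).reverse.map (fun (k : Nat) => (1 + (k:Int) : Int)))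
    = ((List.range (m-1)).map (pfDef (lcgList st (m-1)) (m:Int))).reverse := by
  rw [mkPairs_zip]
  apply List.ext_getElem
  · simp [lcgList_length]
  intro k hk1 hk2
  have hkm : k < m - 1 := by
    simpa using hk2
  rw [List.getElem_map, List.getElem_zip, List.getElem_map, List.getElem_reverse,
      List.getElem_reverse, List.getElem_map]
  simp only [List.length_map, List.length_reverse, List.length_range, List.getElem_range]
  unfold pfDef
  rw [Prod.mk.injEq]
  refine ⟨by omega, ?_⟩
  have hidx : ((m:Int) - 1 - (1 + ((m - 1 - 1 - k : Nat) : Int))) = (k : Int) := by omega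
  rw [hidx, PySem.List.pyGetD_natCast,
      List.getD_eq_getElem _ _ (by rw [lcgList_length]; omega)]

-- B's scatter loop over the enumerated characters, in Nat form
theorem scatter_conv (perm : List Int) (g : Nat → Nat) (cs : List Char) (ks : List Nat)
    (h : ∀ k ∈ ks, PySem.List.pyGetD perm (k:Int) 0 = ((g k : Nat) : Int)) (o : List String) :
    List.foldl (fun o (kc : Int × Char) =>
        PySem.List.pySetD o (PySem.List.pyGetD perm kc.1 0) (String.ofList [kc.2]))
      o ((ks.map (fun (k : Nat) => (k:Int))).map (fun j => (j, PySem.List.pyGetD cs j ' ')))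
    = List.foldl (fun o k => o.set (g k) (String.ofList [cs.getD k ' '])) o ks := by
  induction ks generalizing o with
  | nil => rfl
  | cons k ks ih =>
    simp only [List.map_cons, List.foldl_cons]
    rw [h k (List.mem_cons_self ..), PySem.List.pySetD_natCast, PySem.List.pyGetD_natCast]
    exact ih (fun k' hk' => h k' (List.mem_cons_of_mem _ hk')) _

-- main combinatorial step: scatter by the forward permutation = A's reverse swap replay
theorem main_core (cs : List Char) (pf : Nat → Nat × Nat) (m : Nat) (hm : m = cs.length)
    (hm2 : 2 ≤ m)
    (hbnd : ∀ q ∈ (List.range (m-1)).map pf, q.1 < m ∧ q.2 < m) :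
    PySem.Str.join ""
      (List.foldl (fun o (kc : Int × Char) =>
          PySem.List.pySetD o
            (PySem.List.pyGetD
              (List.foldl (fun p q => swapD (0:Int) p q.1 q.2)
                (PySem.List.pyRange 0 (m:Int))
                (((List.range (m-1)).map pf).reverse))
              kc.1 0)
            (String.ofList [kc.2]))
        (List.replicate m "") (PySem.List.enumerate cs))
    = String.ofList (List.foldl (fun r q => swapD ' ' r q.1 q.2) cs ((List.range (m-1)).map pf)) := by
  set ps := (List.range (m-1)).map pf with hps'
  set perm := List.foldl (fun p q => swapD (0:Int) p q.1 q.2) (PySem.List.pyRange 0 (m:Int)) ps.reverse with hperm'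
  set resA := List.foldl (fun r q => swapD ' ' r q.1 q.2) cs ps with hresA
  have hlenPR : (PySem.List.pyRange 0 (m:Int)).length = m := by
    rw [PySem.List.length_pyRange_one]; omega
  have hbndR : ∀ q ∈ ps.reverse, q.1 < m ∧ q.2 < m := fun q hq => hbnd q (List.mem_reverse.1 hq)
  have hresAlen : resA.length = m := by rw [hresA, length_foldl_swapD, hm]
  have hpermget : ∀ k : Nat, k < m → perm.getD k 0 = ((sigmaN ps.reverse k : Nat) : Int) := by
    intro k hk
    rw [hperm', getD_foldl_swapD 0 ps.reverse _ (by
      intro q hq; rw [hlenPR]; exact hbndR q hq)]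
    have ht : sigmaN ps.reverse k < m := sigmaN_lt ps.reverse hbndR hk
    rw [List.getD_eq_getElem _ _ (by rw [hlenPR]; exact ht), PySem.List.getElem_pyRange_one]
    simp
  rw [PySem.List.enumerate_eq_map_pyRange cs ' ', PySem.List.len_eq, ← hm,
      PySem.List.pyRange_zero_natCast m,
      scatter_conv perm (fun k => sigmaN ps.reverse k) cs (List.range m)
        (by
          intro k hk
          rw [PySem.List.pyGetD_natCast]
          exact hpermget k (List.mem_range.1 hk))
        (List.replicate m "")]
  have hout : List.foldl
        (fun o k => o.set (sigmaN ps.reverse k) (String.ofList [cs.getD k ' ']))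
        (List.replicate m "") (List.range m)
      = resA.map (fun c => String.ofList [c]) := by
    apply List.ext_getElem
    · rw [scatter_length]; simp [hresAlen]
    intro p hp1 hp2
    have hpm : p < m := by
      rw [scatter_length, List.length_replicate] at hp1; exact hp1
    have hk0m : sigmaN ps p < m := sigmaN_lt ps hbnd hpm
    have hgk0 : sigmaN ps.reverse (sigmaN ps p) = p := sigmaN_reverse_sigmaN ps p
    rw [← List.getD_eq_getElem _ "" hp1]
    conv_lhs => rw [← hgk0]
    rw [scatter_hit "" (fun k => sigmaN ps.reverse k) (fun k => String.ofList [cs.getD k ' '])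
          (List.range m) _ List.nodup_range
          (by
            intro k hk
            rw [List.length_replicate]
            exact sigmaN_lt ps.reverse hbndR (List.mem_range.1 hk))
          (by
            intro k hk k' hk' he
            have h2 := congrArg (sigmaN ps) he
            rwa [sigmaN_sigmaN_reverse, sigmaN_sigmaN_reverse] at h2)
          (List.mem_range.2 hk0m)]
    rw [List.getElem_map]
    rw [← List.getD_eq_getElem resA ' ' (by rw [hresAlen]; exact hpm)]
    rw [hresA, getD_foldl_swapD ' ' ps cs (by rw [← hm]; exact hbnd)]
  rw [hout]
  rw [show ∀ parts, PySem.Str.join "" parts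
        = String.ofList (PySem.Chars.join [] (parts.map String.toList)) from fun _ => rfl]
  rw [List.map_map]
  have hcomp : (String.toList ∘ fun c => String.ofList [c]) = fun (c : Char) => [c] := by
    funext c; simp [String.toList_ofList]
  rw [hcomp, PySem.Chars.join_nil_singletons]

-- ===== VERDICT (by name: the statement is the Claim_ definition above) =====
theorem unshuffle_answers_py_spec : Claim_equal_unshuffle_answers_py := by
  intro answers seed _
  unfold Spec_unshuffle_answers_py unshuffle_answers_py unshuffle_answers_py_alt
  by_cases hs : seed = 0
  · simp [hs]
  rw [if_neg hs, if_neg hs]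
  by_cases hn : PySem.Str.len answers ≤ 1
  · rw [if_pos hn, if_pos hn]
  rw [if_neg hn, if_neg hn]
  dsimp only
  set nn := PySem.Str.len answers with hnn
  set cs := answers.toList with hcs
  set m := cs.length with hmdef
  have hnm : nn = (m : Int) := by rw [hnn, hmdef, hcs]; exact PySem.Str.len_eq answers
  have hm2 : 2 ≤ m := by rw [hnm] at hn; omega
  set st0 := PySem.Int.band seed 4294967295 with hst0
  set L := lcgList st0 (m - 1) with hLdef
  have hLA : lcg_sequence_py seed (nn - 1) = L := by
    rw [lcg_seq_eq, ← hst0, hLdef]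
    congr 1
    rw [hnm]
    omega
  have e1 : PySem.List.pyRange 1 nn = (List.range (m-1)).map (fun (k : Nat) => (1 + (k:Int) : Int)) := by
    rw [PySem.List.pyRange_one, show ((nn - 1).toNat) = m - 1 by rw [hnm]; omega]
  have e2 : PySem.List.pyRange (nn - 1) 0 (-1)
      = ((List.range (m-1)).reverse.map (fun (k : Nat) => (1 + (k:Int) : Int))) := by
    rw [PySem.List.pyRange_neg_one_eq_reverse, show (0:Int) + 1 = 1 by ring,
        show nn - 1 + 1 = nn by ring, e1, ← List.map_reverse]
  rw [hLA, e1, e2]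
  rw [foldBody_eq L nn cs (List.range (m-1))]
  rw [streamFold_eq _ st0 _ (by
        intro i hi
        rcases List.mem_map.1 hi with ⟨k, _, rfl⟩
        positivity)]
  rw [mkPairs_eq st0 m hm2, ← hLdef]
  rw [hnm, PySem.List.pyRepeat_singleton, Int.toNat_natCast]
  exact (main_core cs (pfDef L (m:Int)) m hmdef hm2 (pfDef_bounds L (m:Int) m)).symm
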